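-- pv_equiv track=rewrite | github.com/Ziyod4433/logistic-bot | services/analytics_service.py | _logists_by_reys
-- ===== SOURCE A (Python) =====
-- from collections import Counter, defaultdict
-- from typing import Any, Callable
--
-- def _clean_text(value: Any) -> str:
--     return str(value or "").replace("\u00a0", " ").strip()
--
-- def _logists_by_reys(logist_rows: list[dict[str, Any]]) -> dict[str, list[str]]:
--     mapped: dict[str, list[str]] = defaultdict(list)
--     for row in logist_rows:
--         reys = _clean_text(row.get("reys_number"))
--         name = _clean_text(row.get("logist_name"))
--         if reys and name and name not in mapped[reys]:
--             mapped[reys].append(name)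
--     return mapped
-- ===== SOURCE B (Python) =====
-- from collections import defaultdict
--
--
-- def _clean_text(value):
--     return str(value or "").replace("\u00a0", " ").strip()
--
--
-- def _logists_by_reys(logist_rows):
--     # Stage 1: flat list of cleaned (reys, name) pairs, keeping only complete ones.
--     pairs = [
--         (reys, name)
--         for reys, name in (
--             (_clean_text(row.get("reys_number")), _clean_text(row.get("logist_name")))
--             for row in logist_rows
--         )
--         if reys and name
--     ]
--     # Stage 2: distinct reys numbers in first-occurrence order.
--     keys = list(dict.fromkeys(reys for reys, _ in pairs))
--     # Stage 3: for each reys, its distinct names in first-occurrence order.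
--     return defaultdict(
--         list, {k: list(dict.fromkeys(n for r, n in pairs if r == k)) for k in keys}
--     )
-- ===== Notes on version B (the rewrite author's own statement) =====
-- stated objective: alternative
-- what changed: Replaces A's single incremental dict-building loop (defaultdict with an inline membership-check dedup) with a dict-free staged pipeline: flatten to a cleaned (reys, name) pair list, take the distinct keys in first-occurrence order, then per key collect its distinct names by filtering the pair list; the defaultdict is only assembled at the end.
import Mathlib
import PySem

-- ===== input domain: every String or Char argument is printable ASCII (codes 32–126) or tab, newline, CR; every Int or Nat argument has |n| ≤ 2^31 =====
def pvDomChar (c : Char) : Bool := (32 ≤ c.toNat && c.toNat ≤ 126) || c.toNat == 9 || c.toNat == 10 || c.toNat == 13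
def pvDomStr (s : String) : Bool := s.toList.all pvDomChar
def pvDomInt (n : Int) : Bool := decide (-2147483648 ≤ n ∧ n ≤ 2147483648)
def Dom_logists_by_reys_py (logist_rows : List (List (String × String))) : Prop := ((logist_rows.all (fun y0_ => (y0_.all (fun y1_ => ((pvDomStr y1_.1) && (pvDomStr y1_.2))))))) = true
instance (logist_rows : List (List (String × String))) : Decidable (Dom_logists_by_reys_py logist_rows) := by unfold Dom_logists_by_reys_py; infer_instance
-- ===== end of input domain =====

-- B replaces A's incremental dict loop with a dict-free staged pipeline (pair list →
-- distinct keys → per-key distinct names); same return value.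

-- shared helper: row.get(k) on an association-list dict (first match)
def pvRowGet (row : List (String × String)) (k : String) : Option String :=
  (row.find? (fun p => p.1 == k)).map (·.2)

-- shared helper: _clean_text(value) = str(value or "").replace("\u00a0", " ").strip()
def pvCleanText (v : Option String) : String :=
  PySem.Str.strip (PySem.Str.replace (v.getD "") "\u00A0" " ")

-- ===== PORT A =====
-- one iteration of A's loop body (mapped[reys] on the defaultdict = setdefault reys [])
def pvStepA (mapped : PySem.Dict String (List String)) (row : List (String × String)) :
    PySem.Dict String (List String) :=
  let reys := pvCleanText (pvRowGet row "reys_number")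
  let name := pvCleanText (pvRowGet row "logist_name")
  if reys ≠ "" ∧ name ≠ "" then
    let m1 := mapped.setdefault reys []
    let cur := m1.getD reys []
    if name ∈ cur then m1 else m1.insert reys (cur ++ [name])
  else mapped

def logists_by_reys_py (logist_rows : List (List (String × String))) : List (String × List String) :=
  (logist_rows.foldl pvStepA PySem.Dict.empty).items

-- ===== PORT B =====
-- stage 1: clean a row to its (reys, name) pair
def pvCleanRow (row : List (String × String)) : String × String :=
  (pvCleanText (pvRowGet row "reys_number"), pvCleanText (pvRowGet row "logist_name"))

def logists_by_reys_py_alt (logist_rows : List (List (String × String))) : List (String × List String) :=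
  -- pairs = [(reys, name) for … if reys and name]
  let pairs := (logist_rows.map pvCleanRow).filter (fun p => p.1 != "" && p.2 != "")
  -- keys = list(dict.fromkeys(reys for reys, _ in pairs))
  let keys := PySem.List.dedup (pairs.map (fun p => p.1))
  -- {k: list(dict.fromkeys(n for r, n in pairs if r == k)) for k in keys}
  keys.map (fun k => (k, PySem.List.dedup ((pairs.filter (fun p => p.1 == k)).map (fun p => p.2))))

-- ===== PRECONDITION & SPEC =====
def Spec_logists_by_reys_py (logist_rows : List (List (String × String))) (out : List (String × List String)) : Prop := out = logists_by_reys_py_alt logist_rows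
instance (logist_rows : List (List (String × String))) (out : List (String × List String)) : Decidable (Spec_logists_by_reys_py logist_rows out) := by unfold Spec_logists_by_reys_py; infer_instance

-- ===== CLAIM (what is proved, stated in full; the proofs are below) =====
def Claim_equal_logists_by_reys_py : Prop := ∀ (logist_rows : List (List (String × String))), Dom_logists_by_reys_py logist_rows → Spec_logists_by_reys_py logist_rows (logists_by_reys_py logist_rows)

-- ===== LEMMAS AND PROOFS =====

-- proof-side helper: the "raw" grouping loop (all names, duplicates kept)
def pvRawStep (d : PySem.Dict String (List String)) (row : List (String × String)) :
    PySem.Dict String (List String) :=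
  let p := pvCleanRow row
  if p.1 ≠ "" ∧ p.2 ≠ "" then d.modify p.1 [] (· ++ [p.2]) else d

theorem pv_keys_insert (d : PySem.Dict String (List String)) (k : String) (v : List String) :
    (d.insert k v).keys = if d.contains k then d.keys else d.keys ++ [k] := by
  simp only [PySem.Dict.keys, PySem.Dict.items_insert]
  split_ifs with h
  · rw [List.map_map]
    apply List.map_congr_left
    intro p _
    by_cases hp : p.1 = k <;> simp [hp]
  · simp

theorem pv_dedup_append_singleton {α : Type} [BEq α] [LawfulBEq α] (l : List α) (n : α) :
    PySem.List.dedup (l ++ [n]) =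
      if n ∈ PySem.List.dedup l then PySem.List.dedup l else PySem.List.dedup l ++ [n] := by
  simp only [PySem.List.dedup, PySem.Set.ofList, List.foldl_append, List.foldl_cons, List.foldl_nil]
  show PySem.Set.add _ n = _
  simp only [PySem.Set.add]
  split_ifs with h1 h2 h2 <;> simp_all

-- the relation carried through A's loop and the raw loop
def pvInv (dA dR : PySem.Dict String (List String)) : Prop :=
  dA.keys = dR.keys ∧ dR.keys.Nodup ∧
    ∀ j, dA.getD j [] = PySem.List.dedup (dR.getD j [])

theorem pv_step_inv (dA dR : PySem.Dict String (List String)) (row : List (String × String))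
    (h : pvInv dA dR) : pvInv (pvStepA dA row) (pvRawStep dR row) := by
  obtain ⟨hk, hnd, hg⟩ := h
  unfold pvStepA pvRawStep pvCleanRow
  set reys := pvCleanText (pvRowGet row "reys_number")
  set name := pvCleanText (pvRowGet row "logist_name")
  by_cases hc : reys ≠ "" ∧ name ≠ ""
  · simp only [if_pos hc]
    have hcont : dA.contains reys = dR.contains reys := by
      rw [PySem.Dict.contains_eq_decide_mem_keys, PySem.Dict.contains_eq_decide_mem_keys, hk]
    have hkeysR : (dR.modify reys [] (· ++ [name])).keys =
        if dR.contains reys then dR.keys else dR.keys ++ [reys] := by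
      rw [PySem.Dict.keys_modify, pv_keys_insert]
    have hm1keys : (dA.setdefault reys []).keys =
        if dR.contains reys then dR.keys else dR.keys ++ [reys] := by
      by_cases hcb : dR.contains reys
      · rw [PySem.Dict.setdefault_of_contains _ _ (by rw [hcont]; exact hcb), hk, if_pos hcb]
      · rw [PySem.Dict.setdefault_of_not_contains _ _
              (by rw [hcont]; exact Bool.eq_false_iff.mpr hcb), pv_keys_insert,
            hcont, if_neg hcb, hk, if_neg hcb]
    have hm1cont : (dA.setdefault reys []).contains reys = true := by
      rw [PySem.Dict.contains_eq_decide_mem_keys, hm1keys]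
      split_ifs with hcb
      · rw [PySem.Dict.contains_eq_decide_mem_keys] at hcb
        simpa using hcb
      · simp
    have hm1get : ∀ j, (dA.setdefault reys []).getD j [] =
        if j = reys then dA.getD reys [] else dA.getD j [] := by
      intro j
      by_cases hj : j = reys
      · subst hj; rw [if_pos rfl, PySem.Dict.getD_setdefault_self]
      · rw [if_neg hj, PySem.Dict.getD_eq_get?_getD,
            PySem.Dict.get?_setdefault_of_ne _ _ hj, ← PySem.Dict.getD_eq_get?_getD]
    have hndR : (dR.modify reys [] (· ++ [name])).keys.Nodup := by
      rw [hkeysR]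
      split_ifs with hcb
      · exact hnd
      · have hmem : reys ∉ dR.keys := by
          rw [PySem.Dict.contains_eq_decide_mem_keys] at hcb; simpa using hcb
        rw [List.nodup_append]
        refine ⟨hnd, List.nodup_singleton _, ?_⟩
        intro a ha b hb
        rw [List.mem_singleton] at hb
        subst hb
        exact fun he => hmem (he ▸ ha)
    refine ⟨?_, hndR, ?_⟩
    · -- keys
      by_cases hm : name ∈ (dA.setdefault reys []).getD reys []
      · rw [if_pos hm, hm1keys, hkeysR]
      · rw [if_neg hm, pv_keys_insert, hm1cont, if_pos rfl, hm1keys, hkeysR]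
    · -- values
      intro j
      have hmod : (dR.modify reys [] (· ++ [name])).getD j [] =
          if j = reys then dR.getD reys [] ++ [name] else dR.getD j [] :=
        PySem.Dict.getD_modify dR reys j [] _
      have hcur : (dA.setdefault reys []).getD reys [] = PySem.List.dedup (dR.getD reys []) := by
        rw [hm1get, if_pos rfl, hg]
      by_cases hm : name ∈ (dA.setdefault reys []).getD reys []
      · rw [if_pos hm, hm1get, hmod]
        by_cases hj : j = reys
        · subst hj
          rw [if_pos rfl, if_pos rfl, hg, pv_dedup_append_singleton,
              if_pos (by rw [← hg]; rw [hcur] at hm; rw [hg]; exact hm)]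
        · rw [if_neg hj, if_neg hj, hg]
      · rw [if_neg hm, hmod, PySem.Dict.getD_insert]
        by_cases hj : j = reys
        · subst hj
          rw [if_pos rfl, if_pos rfl, hcur, pv_dedup_append_singleton,
              if_neg (by rw [← hcur]; exact hm)]
        · rw [if_neg hj, if_neg hj, hm1get, if_neg hj, hg]
  · simp only [if_neg hc]
    exact ⟨hk, hnd, hg⟩

theorem pv_foldl_inv (rows : List (List (String × String)))
    (dA dR : PySem.Dict String (List String)) (h : pvInv dA dR) :
    pvInv (rows.foldl pvStepA dA) (rows.foldl pvRawStep dR) := by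
  induction rows generalizing dA dR with
  | nil => exact h
  | cons r rs ih =>
      rw [List.foldl_cons, List.foldl_cons]
      exact ih _ _ (pv_step_inv dA dR r h)

-- the raw loop over rows IS the modify-fold over the cleaned, filtered pair list
theorem pv_raw_eq_pairs_fold (rows : List (List (String × String)))
    (d : PySem.Dict String (List String)) :
    rows.foldl pvRawStep d =
      (((rows.map pvCleanRow).filter (fun p => p.1 != "" && p.2 != "")).foldl
        (fun d p => d.modify p.1 [] (· ++ [p.2])) d) := by
  induction rows generalizing d with
  | nil => rfl
  | cons r rs ih =>
      rw [List.foldl_cons, List.map_cons, List.filter_cons]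
      by_cases hc : (pvCleanRow r).1 ≠ "" ∧ (pvCleanRow r).2 ≠ ""
      · rw [if_pos (by simpa using hc), List.foldl_cons, ← ih]
        unfold pvRawStep
        rw [if_pos hc]
      · rw [if_neg (by simpa using hc), ← ih]
        unfold pvRawStep
        rw [if_neg hc]

-- ===== VERDICT (by name: the statement is the Claim_ definition above) =====
theorem logists_by_reys_py_spec : Claim_equal_logists_by_reys_py := by
  intro rows _
  unfold Spec_logists_by_reys_py logists_by_reys_py logists_by_reys_py_alt
  have hinv : pvInv (rows.foldl pvStepA PySem.Dict.empty) (rows.foldl pvRawStep PySem.Dict.empty) :=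
    pv_foldl_inv rows _ _ ⟨rfl, List.nodup_nil, fun j => rfl⟩
  obtain ⟨hk, hnd, hg⟩ := hinv
  set pairs := (rows.map pvCleanRow).filter (fun p => p.1 != "" && p.2 != "") with hpairs
  have hraw : rows.foldl pvRawStep PySem.Dict.empty =
      pairs.foldl (fun d p => d.modify p.1 [] (· ++ [p.2])) PySem.Dict.empty :=
    pv_raw_eq_pairs_fold rows _
  have hkeysR : (rows.foldl pvRawStep PySem.Dict.empty).keys =
      PySem.List.dedup (pairs.map (fun p => p.1)) := by
    rw [hraw, PySem.Dict.keys_foldl_modify_key]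
    simp [PySem.Set.update_nil_left, PySem.Dict.keys_empty]
  have hgetR : ∀ k, (rows.foldl pvRawStep PySem.Dict.empty).getD k [] =
      (pairs.filter (fun p => p.1 == k)).map (fun p => p.2) := by
    intro k
    rw [hraw]
    simpa using PySem.Dict.getD_foldl_modify_append pairs PySem.Dict.empty k
  have hndA : (rows.foldl pvStepA PySem.Dict.empty).keys.Nodup := by rw [hk]; exact hnd
  rw [PySem.Dict.items_eq_map_keys _ hndA []]
  rw [hk, hkeysR]
  apply List.map_congr_left
  intro k _
  rw [hg k, hgetR k]
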